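-- pv_equiv track=rewrite | github.com/XIONG-ZHIPeng/Leetcode | 221variant.py | solution
-- ===== SOURCE A (Python) =====
-- def solution(A):
--     # Implement your solution here
--     M, N = len(A), len(A[0])
--     dp = [[0] * (N + 1) for _ in range(M+1)]
--     squares= dict()
--
--     # get the square size information
--     for r in range(M):
--         for c in range(N):
--             if A[r][c]:
--                 dp[r+1][c+1] = min(dp[r][c],dp[r+1][c],dp[r][c+1]) + 1
--                 if dp[r+1][c+1] not in squares:
--                     new_square = [1, [(r,c)]]
--                     squares[dp[r+1][c+1]] = new_square
--                 else:
--                     old_square = squares.get(dp[r+1][c+1])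
--                     new_square = [old_square[0]+1,old_square[1]+[(r,c)]]
--                     squares[dp[r+1][c+1]] = new_square
--
--
--     max_square = 0
--     # check if 2 squares exist
--     for k, v in squares.items():
--         if v[0] >= 2:
--             positions = v[1]
--             for i in range(len(positions)):
--                 for j in range(i + 1, len(positions)):
--                     r1, c1 = positions[i]
--                     r2, c2 = positions[j]
--                     if abs(r1 - r2) >= k or abs(c1 - c2) >= k:
--                         max_square = max(max_square, k*k)
--
--
--     return max_square
-- ===== SOURCE B (Python) =====
-- def solution(A):
--     N = len(A[0])
--     agg = {}
--     prev = [0] * (N + 1)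
--     for r in range(len(A)):
--         cur = [0] * (N + 1)
--         row = A[r]
--         for c in range(N):
--             if row[c]:
--                 s = min(prev[c], prev[c + 1], cur[c]) + 1
--                 cur[c + 1] = s
--                 g = agg.get(s)
--                 if g is None:
--                     agg[s] = (r, r, c, c)
--                 else:
--                     agg[s] = (min(g[0], r), max(g[1], r), min(g[2], c), max(g[3], c))
--         prev = cur
--     best = 0
--     for s, (rmin, rmax, cmin, cmax) in agg.items():
--         if rmax - rmin >= s or cmax - cmin >= s:
--             best = max(best, s * s)
--     return best
-- ===== Notes on version B (the rewrite author's own statement) =====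
-- stated objective: faster
-- what changed: B replaces A's O(G^2) all-pairs comparison inside each equal-size group of squares by per-size (min row, max row, min col, max col) aggregates maintained in one pass (two equal k-squares are disjoint iff the row range or the column range reaches k), and keeps only two rolling dp rows instead of the full (M+1)x(N+1) matrix.
import Mathlib
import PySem

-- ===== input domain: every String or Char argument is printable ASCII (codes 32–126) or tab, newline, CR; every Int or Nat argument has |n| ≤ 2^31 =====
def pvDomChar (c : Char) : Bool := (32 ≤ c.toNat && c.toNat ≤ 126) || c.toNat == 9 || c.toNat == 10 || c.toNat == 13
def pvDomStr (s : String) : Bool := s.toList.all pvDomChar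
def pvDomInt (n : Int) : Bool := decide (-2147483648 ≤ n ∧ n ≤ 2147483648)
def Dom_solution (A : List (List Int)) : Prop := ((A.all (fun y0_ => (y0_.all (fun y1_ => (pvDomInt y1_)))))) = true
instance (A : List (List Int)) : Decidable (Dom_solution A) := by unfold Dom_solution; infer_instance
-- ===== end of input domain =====

-- B replaces A's quadratic all-pairs scan inside each square-size group by per-size (min row, max row,
-- min col, max col) aggregates (two groups of equal squares are disjoint iff a row- or column-range is wide
-- enough), and keeps only two dp rows instead of the full matrix; objective: faster.

-- ===== PORT A =====
-- dp[i][j] read/write; indices produced by the loops are nonnegative and in range, where .toNat is exact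
def pvMatGet (dp : List (List Int)) (i j : Int) : Int := (dp.getD i.toNat []).getD j.toNat 0
def pvMatSet (dp : List (List Int)) (i j : Int) (v : Int) : List (List Int) :=
  dp.set i.toNat ((dp.getD i.toNat []).set j.toNat v)

-- body of A's inner 'for c in range(N)' loop
def pvCellA (A : List (List Int)) (r : Int)
    (st : List (List Int) × PySem.Dict Int (Int × List (Int × Int))) (c : Int) :
    List (List Int) × PySem.Dict Int (Int × List (Int × Int)) :=
  if (A.getD r.toNat []).getD c.toNat 0 ≠ 0 then
    let k := min (min (pvMatGet st.1 r c) (pvMatGet st.1 (r + 1) c)) (pvMatGet st.1 r (c + 1)) + 1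
    let dp := pvMatSet st.1 (r + 1) (c + 1) k
    match st.2.get? k with
    | none => (dp, st.2.insert k ((1 : Int), [(r, c)]))
    | some old => (dp, st.2.insert k (old.1 + 1, old.2 ++ [(r, c)]))
  else st

-- body of A's outer 'for r in range(M)' loop
def pvRowA (A : List (List Int)) (N : Int)
    (st : List (List Int) × PySem.Dict Int (Int × List (Int × Int))) (r : Int) :
    List (List Int) × PySem.Dict Int (Int × List (Int × Int)) :=
  (PySem.List.pyRange 0 N 1).foldl (pvCellA A r) st

-- body of A's 'for k, v in squares.items()' loop (the all-pairs scan)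
def pvEntryA (m : Int) (kv : Int × (Int × List (Int × Int))) : Int :=
  if kv.2.1 ≥ 2 then
    (PySem.List.pyRange 0 (kv.2.2.length : Int) 1).foldl (fun m i =>
      (PySem.List.pyRange (i + 1) (kv.2.2.length : Int) 1).foldl (fun m j =>
        if |(kv.2.2.getD i.toNat (0, 0)).1 - (kv.2.2.getD j.toNat (0, 0)).1| ≥ kv.1 ∨
           |(kv.2.2.getD i.toNat (0, 0)).2 - (kv.2.2.getD j.toNat (0, 0)).2| ≥ kv.1
        then max m (kv.1 * kv.1) else m) m) m
  else m

def solution (A : List (List Int)) : Int :=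
  let M : Int := A.length
  let N : Int := (A.getD 0 []).length
  let dp0 : List (List Int) := List.replicate (M.toNat + 1) (List.replicate (N.toNat + 1) 0)
  let st := (PySem.List.pyRange 0 M 1).foldl (pvRowA A N)
      (dp0, (PySem.Dict.empty : PySem.Dict Int (Int × List (Int × Int))))
  st.2.items.foldl pvEntryA 0

-- ===== PORT B =====
-- body of B's inner 'for c in range(N)' loop: state is (cur, agg); prev is the previous dp row
def pvCellB (row : List Int) (r : Int) (prev : List Int)
    (st2 : List Int × PySem.Dict Int (Int × Int × Int × Int)) (c : Int) :
    List Int × PySem.Dict Int (Int × Int × Int × Int) :=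
  if row.getD c.toNat 0 ≠ 0 then
    let s := min (min (prev.getD c.toNat 0) (prev.getD (c + 1).toNat 0)) (st2.1.getD c.toNat 0) + 1
    let cur := st2.1.set (c + 1).toNat s
    match st2.2.get? s with
    | none => (cur, st2.2.insert s (r, r, c, c))
    | some g => (cur, st2.2.insert s (min g.1 r, max g.2.1 r, min g.2.2.1 c, max g.2.2.2 c))
  else st2

-- body of B's outer 'for r in range(len(A))' loop: state is (prev, agg)
def pvRowB (A : List (List Int)) (N : Int)
    (st : List Int × PySem.Dict Int (Int × Int × Int × Int)) (r : Int) :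
    List Int × PySem.Dict Int (Int × Int × Int × Int) :=
  let row := A.getD r.toNat []
  let st2 := (PySem.List.pyRange 0 N 1).foldl (pvCellB row r st.1)
      (List.replicate (N.toNat + 1) (0 : Int), st.2)
  (st2.1, st2.2)

-- body of B's 'for s, (rmin, rmax, cmin, cmax) in agg.items()' loop
def pvEntryB (best : Int) (kv : Int × (Int × Int × Int × Int)) : Int :=
  if kv.1 ≤ kv.2.2.1 - kv.2.1 ∨ kv.1 ≤ kv.2.2.2.2 - kv.2.2.2.1 then max best (kv.1 * kv.1) else best

def solution_alt (A : List (List Int)) : Int :=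
  let N : Int := (A.getD 0 []).length
  let st := (PySem.List.pyRange 0 (A.length : Int) 1).foldl (pvRowB A N)
      (List.replicate (N.toNat + 1) (0 : Int), (PySem.Dict.empty : PySem.Dict Int (Int × Int × Int × Int)))
  st.2.items.foldl pvEntryB 0

-- ===== PRECONDITION & SPEC =====
-- Pre_ excludes exactly the inputs where the Python A raises: the empty grid (A[0] is an IndexError)
-- and grids with a row shorter than the first row (A[r][c] is an IndexError for some c < len(A[0])).
def Pre_solution (A : List (List Int)) : Prop :=
  A ≠ [] ∧ ∀ row ∈ A, (A.headD []).length ≤ row.length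
instance (A : List (List Int)) : Decidable (Pre_solution A) := by unfold Pre_solution; infer_instance
def pvWitness_solution : List (List Int) := [[1]]
def Spec_solution (A : List (List Int)) (out : Int) : Prop := out = solution_alt A
instance (A : List (List Int)) (out : Int) : Decidable (Spec_solution A out) := by unfold Spec_solution; infer_instance

-- ===== CLAIM (what is proved, stated in full; the proofs are below) =====
def Claim_equal_solution : Prop := ∀ (A : List (List Int)), Dom_solution A → Pre_solution A → Spec_solution A (solution A)

-- ===== LEMMAS AND PROOFS =====

-- small getD facts
theorem pvGetD_set_self {α : Type} (l : List α) (i : Nat) (v d : α) (h : i < l.length) :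
    (l.set i v).getD i d = v := by
  simp [List.getD_eq_getElem?_getD, h]

theorem pvGetD_set_ne {α : Type} (l : List α) (i j : Nat) (v : α) (d : α) (h : i ≠ j) :
    (l.set i v).getD j d = l.getD j d := by
  simp [List.getD_eq_getElem?_getD, List.getElem?_set_ne h]

theorem pvGetD_mem {α : Type} (l : List α) (i : Nat) (d : α) (h : i < l.length) :
    l.getD i d ∈ l := by
  rw [List.getD_eq_getElem _ _ h]; exact List.getElem_mem h

theorem pvGetD_nonneg (l : List Int) (i : Nat) (h : ∀ x ∈ l, 0 ≤ x) : 0 ≤ l.getD i 0 := by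
  rcases Nat.lt_or_ge i l.length with hi | hi
  · exact h _ (pvGetD_mem l i 0 hi)
  · rw [List.getD_eq_default _ _ hi]

-- the min/max aggregate B maintains, as a function of A's position list
def pvStep4 (a : Int × Int × Int × Int) (q : Int × Int) : Int × Int × Int × Int :=
  (min a.1 q.1, max a.2.1 q.1, min a.2.2.1 q.2, max a.2.2.2 q.2)

def summ : List (Int × Int) → Int × Int × Int × Int
  | [] => (0, 0, 0, 0)
  | p :: t => t.foldl pvStep4 (p.1, p.1, p.2, p.2)

-- relation between A's squares dict and B's agg dict
def AgRel (sq : PySem.Dict Int (Int × List (Int × Int)))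
    (ag : PySem.Dict Int (Int × Int × Int × Int)) : Prop :=
  sq.keys.Nodup ∧
  ag.items = sq.items.map (fun e => (e.1, summ e.2.2)) ∧
  ∀ e ∈ sq.items, e.2.1 = (e.2.2.length : Int) ∧ e.2.2 ≠ [] ∧ 1 ≤ e.1

-- matrix invariants: dp is A's (M+1)×(N+1) matrix, prev/cur are B's rolling rows
def RowsOK (N : Nat) (dp : List (List Int)) : Prop :=
  ∀ row ∈ dp, row.length = N + 1 ∧ ∀ x ∈ row, 0 ≤ x

def OutInv (M N r : Nat) (dp : List (List Int)) (prev : List Int) : Prop :=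
  dp.length = M + 1 ∧ RowsOK N dp ∧ dp.getD r [] = prev ∧
  ∀ i : Nat, r < i → i ≤ M → dp.getD i [] = List.replicate (N + 1) (0 : Int)

def RowInv (M N r : Nat) (dp : List (List Int)) (prev cur : List Int) : Prop :=
  dp.length = M + 1 ∧ RowsOK N dp ∧ dp.getD r [] = prev ∧ dp.getD (r + 1) [] = cur ∧
  ∀ i : Nat, r + 1 < i → i ≤ M → dp.getD i [] = List.replicate (N + 1) (0 : Int)

-- lookup in a value-mapped dict
theorem pvGet?_map {V W : Type} (g : V → W) (l : List (Int × V)) (k : Int) :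
    (PySem.Dict.mk (l.map (fun e => (e.1, g e.2)))).get? k
      = ((PySem.Dict.mk l).get? k).map g := by
  induction l with
  | nil => simp [PySem.Dict.get?]
  | cons e t ih =>
    rcases e with ⟨k', v⟩
    simp only [List.map_cons, PySem.Dict.get?_mk_cons]
    by_cases h : k' = k
    · simp [h]
    · simp [h, ih]

theorem pvAg_get? (sq : PySem.Dict Int (Int × List (Int × Int)))
    (ag : PySem.Dict Int (Int × Int × Int × Int))
    (h : ag.items = sq.items.map (fun e => (e.1, summ e.2.2))) (k : Int) :
    ag.get? k = (sq.get? k).map (fun v => summ v.2) := by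
  have h1 : ag = PySem.Dict.mk (sq.items.map (fun e => (e.1, summ e.2.2))) := PySem.Dict.ext h
  have h2 : sq = PySem.Dict.mk sq.items := PySem.Dict.ext rfl
  rw [h1, ← h2.symm]
  exact pvGet?_map (fun v => summ v.2) sq.items k

theorem summ_append (p q : Int × Int) (t : List (Int × Int)) :
    summ ((p :: t) ++ [q]) = pvStep4 (summ (p :: t)) q := by
  simp [summ, List.foldl_append]

-- the dict step of one filled cell preserves AgRel
theorem AgRel_step (sq : PySem.Dict Int (Int × List (Int × Int)))
    (ag : PySem.Dict Int (Int × Int × Int × Int)) (h : AgRel sq ag)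
    (k r c : Int) (hk : 1 ≤ k) :
    AgRel (match sq.get? k with
           | none => sq.insert k ((1 : Int), [(r, c)])
           | some old => sq.insert k (old.1 + 1, old.2 ++ [(r, c)]))
          (match ag.get? k with
           | none => ag.insert k (r, r, c, c)
           | some g => ag.insert k (min g.1 r, max g.2.1 r, min g.2.2.1 c, max g.2.2.2 c)) := by
  obtain ⟨hnd, hmap, hinv⟩ := h
  have hget := pvAg_get? sq ag hmap k
  cases hsq : sq.get? k with
  | none =>
    have hagn : ag.get? k = none := by rw [hget, hsq]; rfl
    have hc1 : sq.contains k = false := (PySem.Dict.get?_eq_none_iff_contains sq k).mp hsq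
    have hc2 : ag.contains k = false := (PySem.Dict.get?_eq_none_iff_contains ag k).mp hagn
    simp only [hagn]
    refine ⟨?_, ?_, ?_⟩
    · exact PySem.Dict.nodup_keys_insert _ _ _ hnd
    · rw [PySem.Dict.items_insert_of_not_contains _ _ hc1,
          PySem.Dict.items_insert_of_not_contains _ _ hc2, hmap]
      simp [summ]
    · intro e he
      rw [PySem.Dict.items_insert_of_not_contains _ _ hc1] at he
      rcases List.mem_append.mp he with h' | h'
      · exact hinv e h'
      · simp at h'; subst h'; refine ⟨by simp, by simp, hk⟩
  | some old =>
    have hagn : ag.get? k = some (summ old.2) := by rw [hget, hsq]; rfl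
    have hc1 : sq.contains k = true := by
      by_contra hcc
      rw [Bool.not_eq_true] at hcc
      rw [(PySem.Dict.get?_eq_none_iff_contains sq k).mpr hcc] at hsq
      simp at hsq
    have hc2 : ag.contains k = true := by
      by_contra hcc
      rw [Bool.not_eq_true] at hcc
      rw [(PySem.Dict.get?_eq_none_iff_contains ag k).mpr hcc] at hagn
      simp at hagn
    have hmem : (k, old) ∈ sq.items := PySem.Dict.mem_items_of_get?_eq_some sq hsq
    obtain ⟨holdlen, holdne, holdk⟩ := hinv (k, old) hmem
    simp only [hagn]
    refine ⟨?_, ?_, ?_⟩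
    · exact PySem.Dict.nodup_keys_insert _ _ _ hnd
    · rw [PySem.Dict.items_insert_of_contains _ _ hc1,
          PySem.Dict.items_insert_of_contains _ _ hc2, hmap, List.map_map, List.map_map]
      apply List.map_congr_left
      intro e he
      by_cases hek : e.1 = k
      · have : e.2 = old := by
          have := PySem.Dict.get?_of_mem_items sq (k := k) (v := e.2)
            (by rw [← hek]; exact he) hnd
          rw [hsq] at this; exact (Option.some_inj.mp this).symm
        obtain ⟨p, t, hpt⟩ : ∃ p t, old.2 = p :: t := by
          cases h' : old.2 with
          | nil => exact absurd h' holdne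
          | cons p t => exact ⟨p, t, rfl⟩
        simp only [Function.comp, hek, this, beq_self_eq_true, if_pos]
        rw [hpt, summ_append]
        rfl
      · simp [Function.comp, hek]
    · intro e he
      rw [PySem.Dict.items_insert_of_contains _ _ hc1] at he
      obtain ⟨e', he', heq⟩ := List.mem_map.mp he
      by_cases hek : e'.1 = k
      · have hbeq : (e'.1 == k) = true := by simp [hek]
        rw [if_pos hbeq] at heq
        subst heq
        refine ⟨?_, by simp [holdne], holdk⟩
        show old.1 + 1 = (((old.2 ++ [(r, c)]).length : Nat) : Int)
        have h' : old.1 = (old.2.length : Int) := holdlen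
        simp only [List.length_append, List.length_cons, List.length_nil]
        omega
      · have hbeq : ¬ (e'.1 == k) = true := by simp [hek]
        rw [if_neg hbeq] at heq
        subst heq
        exact hinv e' he'

-- replicate access
theorem pvGetD_replicate {α : Type} (n i : Nat) (x d : α) (h : i < n) :
    (List.replicate n x).getD i d = x := by
  simp [List.getD_eq_getElem?_getD, h]

-- a fold that takes max m K whenever the element satisfies P
theorem pvFoldl_if_max {α : Type} (P : α → Prop) [DecidablePred P] (K : Int) :
    ∀ (l : List α) (m : Int),
      l.foldl (fun m x => if P x then max m K else m) m = if ∃ x ∈ l, P x then max m K else m := by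
  intro l
  induction l with
  | nil => intro m; simp
  | cons x t ih =>
    intro m
    simp only [List.foldl_cons]
    by_cases hx : P x
    · rw [if_pos hx, ih]
      by_cases ht : ∃ y ∈ t, P y
      · rw [if_pos ht, if_pos ⟨x, List.mem_cons_self, hx⟩, max_assoc, max_self]
      · rw [if_neg ht, if_pos ⟨x, List.mem_cons_self, hx⟩]
    · rw [if_neg hx, ih]
      by_cases ht : ∃ y ∈ t, P y
      · rw [if_pos ht, if_pos (by obtain ⟨y, hy, hPy⟩ := ht; exact ⟨y, List.mem_cons_of_mem x hy, hPy⟩)]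
      · rw [if_neg ht, if_neg (by rintro ⟨y, hy, hPy⟩; rcases List.mem_cons.mp hy with h | h
                                  · exact hx (h ▸ hPy)
                                  · exact ht ⟨y, h, hPy⟩)]

-- the four components of the aggregate fold
theorem pvFold4_eq : ∀ (t : List (Int × Int)) (a b c d : Int),
    t.foldl pvStep4 (a, b, c, d)
      = ((t.map Prod.fst).foldl min a, (t.map Prod.fst).foldl max b,
         (t.map Prod.snd).foldl min c, (t.map Prod.snd).foldl max d) := by
  intro t
  induction t with
  | nil => intro a b c d; rfl
  | cons q t ih => intro a b c d; simp only [List.foldl_cons, List.map_cons, pvStep4]; exact ih _ _ _ _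

theorem summ_eq (p : Int × Int) (t : List (Int × Int)) :
    summ (p :: t)
      = ((t.map Prod.fst).foldl min p.1, (t.map Prod.fst).foldl max p.1,
         (t.map Prod.snd).foldl min p.2, (t.map Prod.snd).foldl max p.2) := by
  simp only [summ]; exact pvFold4_eq t p.1 p.1 p.2 p.2

theorem summ_le (p : Int × Int) (t : List (Int × Int)) :
    ∀ q ∈ p :: t, (summ (p :: t)).1 ≤ q.1 ∧ q.1 ≤ (summ (p :: t)).2.1 ∧
      (summ (p :: t)).2.2.1 ≤ q.2 ∧ q.2 ≤ (summ (p :: t)).2.2.2 := by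
  intro q hq
  rw [summ_eq]
  rcases List.mem_cons.mp hq with h | h
  · subst h
    exact ⟨(PySem.List.foldl_min_le _ _).1, (PySem.List.le_foldl_max _ _).1,
           (PySem.List.foldl_min_le _ _).1, (PySem.List.le_foldl_max _ _).1⟩
  · exact ⟨(PySem.List.foldl_min_le _ _).2 q.1 (List.mem_map.mpr ⟨q, h, rfl⟩),
           (PySem.List.le_foldl_max _ _).2 q.1 (List.mem_map.mpr ⟨q, h, rfl⟩),
           (PySem.List.foldl_min_le _ _).2 q.2 (List.mem_map.mpr ⟨q, h, rfl⟩),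
           (PySem.List.le_foldl_max _ _).2 q.2 (List.mem_map.mpr ⟨q, h, rfl⟩)⟩

theorem summ_attained (p : Int × Int) (t : List (Int × Int)) :
    (∃ q ∈ p :: t, q.1 = (summ (p :: t)).1) ∧ (∃ q ∈ p :: t, q.1 = (summ (p :: t)).2.1) ∧
    (∃ q ∈ p :: t, q.2 = (summ (p :: t)).2.2.1) ∧ (∃ q ∈ p :: t, q.2 = (summ (p :: t)).2.2.2) := by
  rw [summ_eq]
  refine ⟨?_, ?_, ?_, ?_⟩
  · rcases PySem.List.foldl_min_mem (t.map Prod.fst) p.1 with h | h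
    · exact ⟨p, List.mem_cons_self, h.symm⟩
    · obtain ⟨q, hq, hv⟩ := List.mem_map.mp h; exact ⟨q, List.mem_cons_of_mem p hq, hv⟩
  · rcases PySem.List.foldl_max_mem (t.map Prod.fst) p.1 with h | h
    · exact ⟨p, List.mem_cons_self, h.symm⟩
    · obtain ⟨q, hq, hv⟩ := List.mem_map.mp h; exact ⟨q, List.mem_cons_of_mem p hq, hv⟩
  · rcases PySem.List.foldl_min_mem (t.map Prod.snd) p.2 with h | h
    · exact ⟨p, List.mem_cons_self, h.symm⟩
    · obtain ⟨q, hq, hv⟩ := List.mem_map.mp h; exact ⟨q, List.mem_cons_of_mem p hq, hv⟩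
  · rcases PySem.List.foldl_max_mem (t.map Prod.snd) p.2 with h | h
    · exact ⟨p, List.mem_cons_self, h.symm⟩
    · obtain ⟨q, hq, hv⟩ := List.mem_map.mp h; exact ⟨q, List.mem_cons_of_mem p hq, hv⟩

-- two equal squares overlap iff both the row range and the column range are < k
theorem pvPair_iff (k : Int) (hk : 1 ≤ k) (ps : List (Int × Int)) (hne : ps ≠ []) :
    (∃ i ∈ PySem.List.pyRange 0 (ps.length : Int) 1,
       ∃ j ∈ PySem.List.pyRange (i + 1) (ps.length : Int) 1,
         |(ps.getD i.toNat (0, 0)).1 - (ps.getD j.toNat (0, 0)).1| ≥ k ∨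
         |(ps.getD i.toNat (0, 0)).2 - (ps.getD j.toNat (0, 0)).2| ≥ k)
    ↔ (k ≤ (summ ps).2.1 - (summ ps).1 ∨ k ≤ (summ ps).2.2.2 - (summ ps).2.2.1) := by
  obtain ⟨p, t, rfl⟩ : ∃ p t, ps = p :: t := by
    cases ps with
    | nil => exact absurd rfl hne
    | cons p t => exact ⟨p, t, rfl⟩
  constructor
  · rintro ⟨i, hi, j, hj, hcond⟩
    rw [PySem.List.mem_pyRange_one] at hi hj
    have hi' : i.toNat < (p :: t).length := by omega
    have hj' : j.toNat < (p :: t).length := by omega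
    have hq1 : (p :: t).getD i.toNat (0, 0) ∈ p :: t := pvGetD_mem _ _ _ hi'
    have hq2 : (p :: t).getD j.toNat (0, 0) ∈ p :: t := pvGetD_mem _ _ _ hj'
    obtain ⟨b11, b12, b13, b14⟩ := summ_le p t _ hq1
    obtain ⟨b21, b22, b23, b24⟩ := summ_le p t _ hq2
    rcases hcond with h | h
    · left
      have habs : |((p :: t).getD i.toNat (0, 0)).1 - ((p :: t).getD j.toNat (0, 0)).1|
          ≤ (summ (p :: t)).2.1 - (summ (p :: t)).1 := abs_sub_le_iff.mpr ⟨by omega, by omega⟩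
      omega
    · right
      have habs : |((p :: t).getD i.toNat (0, 0)).2 - ((p :: t).getD j.toNat (0, 0)).2|
          ≤ (summ (p :: t)).2.2.2 - (summ (p :: t)).2.2.1 := abs_sub_le_iff.mpr ⟨by omega, by omega⟩
      omega
  · intro h
    obtain ⟨a1, a2, a3, a4⟩ := summ_attained p t
    have build : ∀ (i j : Nat), i < j → j < (p :: t).length →
        (|((p :: t).getD i (0, 0)).1 - ((p :: t).getD j (0, 0)).1| ≥ k ∨
         |((p :: t).getD i (0, 0)).2 - ((p :: t).getD j (0, 0)).2| ≥ k) →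
        (∃ i ∈ PySem.List.pyRange 0 ((p :: t).length : Int) 1,
          ∃ j ∈ PySem.List.pyRange (i + 1) ((p :: t).length : Int) 1,
            |((p :: t).getD i.toNat (0, 0)).1 - ((p :: t).getD j.toNat (0, 0)).1| ≥ k ∨
            |((p :: t).getD i.toNat (0, 0)).2 - ((p :: t).getD j.toNat (0, 0)).2| ≥ k) := by
      intro i j hij hj hcond
      have hl1 : (i : Int) < (((p :: t).length : Nat) : Int) := by exact_mod_cast Nat.lt_trans hij hj
      have hl2 : (j : Int) < (((p :: t).length : Nat) : Int) := by exact_mod_cast hj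
      have hl3 : (i : Int) + 1 ≤ (j : Int) := by exact_mod_cast hij
      refine ⟨(i : Int), PySem.List.mem_pyRange_one.mpr ⟨by omega, hl1⟩,
              (j : Int), PySem.List.mem_pyRange_one.mpr ⟨hl3, hl2⟩, ?_⟩
      rw [Int.toNat_natCast, Int.toNat_natCast]
      exact hcond
    rcases h with h | h
    · obtain ⟨q1, hq1, hv1⟩ := a1
      obtain ⟨q2, hq2, hv2⟩ := a2
      obtain ⟨i, hi, hgi⟩ := List.mem_iff_getElem.mp hq1
      obtain ⟨j, hj, hgj⟩ := List.mem_iff_getElem.mp hq2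
      have e1 : (p :: t).getD i (0, 0) = q1 := by rw [List.getD_eq_getElem _ _ hi, hgi]
      have e2 : (p :: t).getD j (0, 0) = q2 := by rw [List.getD_eq_getElem _ _ hj, hgj]
      have hne' : q1.1 < q2.1 := by omega
      have hij : i ≠ j := by
        intro hh
        rw [hh] at e1
        have : q1.1 = q2.1 := by rw [← e1, e2]
        omega
      rcases Nat.lt_or_ge i j with hlt | hge
      · refine build i j hlt hj (Or.inl ?_)
        rw [e1, e2, hv1, hv2, abs_sub_comm, abs_of_nonneg (by omega)]
        omega
      · refine build j i (by omega) hi (Or.inl ?_)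
        rw [e1, e2, hv1, hv2, abs_of_nonneg (by omega)]
        omega
    · obtain ⟨q1, hq1, hv1⟩ := a3
      obtain ⟨q2, hq2, hv2⟩ := a4
      obtain ⟨i, hi, hgi⟩ := List.mem_iff_getElem.mp hq1
      obtain ⟨j, hj, hgj⟩ := List.mem_iff_getElem.mp hq2
      have e1 : (p :: t).getD i (0, 0) = q1 := by rw [List.getD_eq_getElem _ _ hi, hgi]
      have e2 : (p :: t).getD j (0, 0) = q2 := by rw [List.getD_eq_getElem _ _ hj, hgj]
      have hne' : q1.2 < q2.2 := by omega
      have hij : i ≠ j := by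
        intro hh
        rw [hh] at e1
        have : q1.2 = q2.2 := by rw [← e1, e2]
        omega
      rcases Nat.lt_or_ge i j with hlt | hge
      · refine build i j hlt hj (Or.inr ?_)
        rw [e1, e2, hv1, hv2, abs_sub_comm, abs_of_nonneg (by omega)]
        omega
      · refine build j i (by omega) hi (Or.inr ?_)
        rw [e1, e2, hv1, hv2, abs_of_nonneg (by omega)]
        omega

-- per-entry: A's all-pairs scan equals B's range test
theorem pvEntry_eq (m : Int) (e : Int × (Int × List (Int × Int)))
    (hlen : e.2.1 = (e.2.2.length : Int)) (hne : e.2.2 ≠ []) (hk : 1 ≤ e.1) :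
    pvEntryA m e = pvEntryB m (e.1, summ e.2.2) := by
  obtain ⟨k, n, ps⟩ := e
  simp only at hlen hne hk
  unfold pvEntryA pvEntryB
  simp only
  have hinner : (fun (m : Int) (i : Int) =>
      (PySem.List.pyRange (i + 1) (ps.length : Int) 1).foldl (fun m j =>
        if |(ps.getD i.toNat (0, 0)).1 - (ps.getD j.toNat (0, 0)).1| ≥ k ∨
           |(ps.getD i.toNat (0, 0)).2 - (ps.getD j.toNat (0, 0)).2| ≥ k
        then max m (k * k) else m) m)
      = fun (m : Int) (i : Int) =>
        if (∃ j ∈ PySem.List.pyRange (i + 1) (ps.length : Int) 1,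
             |(ps.getD i.toNat (0, 0)).1 - (ps.getD j.toNat (0, 0)).1| ≥ k ∨
             |(ps.getD i.toNat (0, 0)).2 - (ps.getD j.toNat (0, 0)).2| ≥ k)
        then max m (k * k) else m := by
    funext m i
    exact pvFoldl_if_max _ (k * k) _ m
  rw [hinner, pvFoldl_if_max _ (k * k)]
  have hiff := pvPair_iff k hk ps hne
  by_cases hEx : ∃ i ∈ PySem.List.pyRange 0 (ps.length : Int) 1,
      ∃ j ∈ PySem.List.pyRange (i + 1) (ps.length : Int) 1,
        |(ps.getD i.toNat (0, 0)).1 - (ps.getD j.toNat (0, 0)).1| ≥ k ∨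
        |(ps.getD i.toNat (0, 0)).2 - (ps.getD j.toNat (0, 0)).2| ≥ k
  · have hn2 : n ≥ 2 := by
      obtain ⟨i, hi, j, hj, -⟩ := hEx
      rw [PySem.List.mem_pyRange_one] at hi hj
      omega
    rw [if_pos hn2, if_pos hEx, if_pos (hiff.mp hEx)]
  · have hB : ¬ (k ≤ (summ ps).2.1 - (summ ps).1 ∨ k ≤ (summ ps).2.2.2 - (summ ps).2.2.1) :=
      fun h => hEx (hiff.mpr h)
    rw [if_neg hB]
    by_cases hn2 : n ≥ 2
    · rw [if_pos hn2, if_neg hEx]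
    · rw [if_neg hn2]

-- phase 2: folding A's entries with the pair scan = folding B's aggregates with the range test
theorem pvPhase2 (sq : PySem.Dict Int (Int × List (Int × Int)))
    (ag : PySem.Dict Int (Int × Int × Int × Int)) (h : AgRel sq ag) :
    sq.items.foldl pvEntryA 0 = ag.items.foldl pvEntryB 0 := by
  obtain ⟨-, hmap, hinv⟩ := h
  rw [hmap, List.foldl_map]
  exact PySem.List.foldl_congr_mem _ _ _ _
    (fun acc e he => pvEntry_eq acc e (hinv e he).1 (hinv e he).2.1 (hinv e he).2.2)

-- relational fold lemmas
theorem pvFoldl_rel {α σ τ : Type} (R : σ → τ → Prop) :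
    ∀ (l : List α) (f : σ → α → σ) (g : τ → α → τ),
      (∀ x ∈ l, ∀ s t, R s t → R (f s x) (g t x)) →
      ∀ s t, R s t → R (l.foldl f s) (l.foldl g t) := by
  intro l
  induction l with
  | nil => intro f g _ s t h; exact h
  | cons x xs ih =>
    intro f g hstep s t h
    simp only [List.foldl_cons]
    exact ih f g (fun y hy => hstep y (List.mem_cons_of_mem x hy)) _ _
      (hstep x List.mem_cons_self s t h)

theorem pvFoldl_rel_range {σ τ : Type} (R : Int → σ → τ → Prop)
    (f : σ → Int → σ) (g : τ → Int → τ) (b : Int) :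
    ∀ (n : Nat) (a : Int), (b - a).toNat = n → a ≤ b →
      (∀ r, a ≤ r → r < b → ∀ s t, R r s t → R (r + 1) (f s r) (g t r)) →
      ∀ s t, R a s t →
        R b ((PySem.List.pyRange a b 1).foldl f s) ((PySem.List.pyRange a b 1).foldl g t) := by
  intro n
  induction n with
  | zero =>
    intro a hn hab h s t hR
    have hba : b = a := by omega
    subst hba
    rw [PySem.List.pyRange_one_eq_nil le_rfl]
    exact hR
  | succ n ih =>
    intro a hn hab h s t hR
    have hlt : a < b := by omega
    rw [PySem.List.pyRange_one_cons hlt]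
    simp only [List.foldl_cons]
    exact ih (a + 1) (by omega) (by omega) (fun r h1 h2 => h r (by omega) h2) _ _
      (h a le_rfl hlt s t hR)

-- one cell: A's matrix/positions step and B's rolling-row/aggregate step stay related
theorem pvCell_step (A : List (List Int)) (Mn Nn : Nat) (r c : Int)
    (hr : 0 ≤ r) (hrM : r < (Mn : Int)) (hc : 0 ≤ c) (_hcN : c < (Nn : Int))
    (dp : List (List Int)) (sq : PySem.Dict Int (Int × List (Int × Int)))
    (prev cur : List Int) (ag : PySem.Dict Int (Int × Int × Int × Int))
    (h1 : RowInv Mn Nn r.toNat dp prev cur) (h2 : AgRel sq ag) :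
    RowInv Mn Nn r.toNat (pvCellA A r (dp, sq) c).1 prev
        (pvCellB (A.getD r.toNat []) r prev (cur, ag) c).1 ∧
      AgRel (pvCellA A r (dp, sq) c).2 (pvCellB (A.getD r.toNat []) r prev (cur, ag) c).2 := by
  obtain ⟨hL, hrows, hprev, hcur, hzero⟩ := h1
  unfold pvCellA pvCellB
  by_cases hcell : (A.getD r.toNat []).getD c.toNat 0 ≠ 0
  · simp only [if_pos hcell]
    have hrtn : (r + 1).toNat = r.toNat + 1 := by omega
    have hctn : (c + 1).toNat = c.toNat + 1 := by omega
    have hprevmem : prev ∈ dp := hprev ▸ pvGetD_mem dp r.toNat [] (by omega)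
    have hcurmem : cur ∈ dp := hcur ▸ pvGetD_mem dp (r.toNat + 1) [] (by omega)
    have hA : pvMatGet dp r c = prev.getD c.toNat 0 := by
      unfold pvMatGet; rw [hprev]
    have hB : pvMatGet dp (r + 1) c = cur.getD c.toNat 0 := by
      unfold pvMatGet; rw [hrtn, hcur]
    have hC : pvMatGet dp r (c + 1) = prev.getD (c.toNat + 1) 0 := by
      unfold pvMatGet; rw [hctn, hprev]
    have hks : min (min (prev.getD c.toNat 0) (prev.getD (c + 1).toNat 0)) (cur.getD c.toNat 0) + 1
        = min (min (pvMatGet dp r c) (pvMatGet dp (r + 1) c)) (pvMatGet dp r (c + 1)) + 1 := by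
      rw [hA, hB, hC, hctn, min_right_comm]
    rw [← hks]
    set k := min (min (prev.getD c.toNat 0) (prev.getD (c + 1).toNat 0)) (cur.getD c.toNat 0) + 1 with hkdef
    have hk1 : 1 ≤ k := by
      have n1 : 0 ≤ prev.getD c.toNat 0 := pvGetD_nonneg _ _ (hrows prev hprevmem).2
      have n2 : 0 ≤ prev.getD (c + 1).toNat 0 := pvGetD_nonneg _ _ (hrows prev hprevmem).2
      have n3 : 0 ≤ cur.getD c.toNat 0 := pvGetD_nonneg _ _ (hrows cur hcurmem).2
      rw [hkdef]; omega
    have hset : pvMatSet dp (r + 1) (c + 1) k = dp.set (r.toNat + 1) (cur.set (c.toNat + 1) k) := by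
      unfold pvMatSet; rw [hrtn, hctn, hcur]
    have hag := AgRel_step sq ag h2 k r c hk1
    have hrowinv : RowInv Mn Nn r.toNat (pvMatSet dp (r + 1) (c + 1) k) prev
        (cur.set (c + 1).toNat k) := by
      rw [hset, hctn]
      refine ⟨by simpa using hL, ?_, ?_, ?_, ?_⟩
      · intro row hrow
        rcases List.mem_or_eq_of_mem_set hrow with h' | h'
        · exact hrows row h'
        · subst h'
          refine ⟨by simpa using (hrows cur hcurmem).1, ?_⟩
          intro x hx
          rcases List.mem_or_eq_of_mem_set hx with h'' | h''
          · exact (hrows cur hcurmem).2 x h''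
          · omega
      · rw [pvGetD_set_ne _ _ _ _ _ (by omega), hprev]
      · rw [pvGetD_set_self _ _ _ _ (by omega)]
      · intro i hi hiM
        rw [pvGetD_set_ne _ _ _ _ _ (by omega)]
        exact hzero i (by omega) hiM
    cases hsq : sq.get? k with
    | none =>
      have hagq : ag.get? k = none := by
        rw [pvAg_get? sq ag h2.2.1 k, hsq]; rfl
      rw [hsq, hagq] at hag
      simp only [hagq]
      exact ⟨hrowinv, hag⟩
    | some old =>
      have hagq : ag.get? k = some (summ old.2) := by
        rw [pvAg_get? sq ag h2.2.1 k, hsq]; rfl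
      rw [hsq, hagq] at hag
      simp only [hagq]
      exact ⟨hrowinv, hag⟩
  · simp only [if_neg hcell]
    exact ⟨⟨hL, hrows, hprev, hcur, hzero⟩, h2⟩

-- one row
theorem pvRow_step (A : List (List Int)) (Mn Nn : Nat) (r : Int)
    (hr : 0 ≤ r) (hrM : r < (Mn : Int))
    (dp : List (List Int)) (sq : PySem.Dict Int (Int × List (Int × Int)))
    (prev : List Int) (ag : PySem.Dict Int (Int × Int × Int × Int))
    (h1 : OutInv Mn Nn r.toNat dp prev) (h2 : AgRel sq ag) :
    OutInv Mn Nn (r.toNat + 1) (pvRowA A (Nn : Int) (dp, sq) r).1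
        (pvRowB A (Nn : Int) (prev, ag) r).1 ∧
      AgRel (pvRowA A (Nn : Int) (dp, sq) r).2 (pvRowB A (Nn : Int) (prev, ag) r).2 := by
  obtain ⟨hL, hrows, hprev, hzero⟩ := h1
  unfold pvRowA pvRowB
  simp only [Int.toNat_natCast]
  have hinit : RowInv Mn Nn r.toNat dp prev (List.replicate (Nn + 1) (0 : Int)) :=
    ⟨hL, hrows, hprev, hzero (r.toNat + 1) (by omega) (by omega), fun i hi hiM => hzero i (by omega) hiM⟩
  have hfold := pvFoldl_rel
    (R := fun (stA : List (List Int) × PySem.Dict Int (Int × List (Int × Int)))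
            (stB : List Int × PySem.Dict Int (Int × Int × Int × Int)) =>
        RowInv Mn Nn r.toNat stA.1 prev stB.1 ∧ AgRel stA.2 stB.2)
    (PySem.List.pyRange 0 (Nn : Int) 1) (pvCellA A r) (pvCellB (A.getD r.toNat []) r prev)
    (fun c hcmem s t hR => by
      rw [PySem.List.mem_pyRange_one] at hcmem
      exact pvCell_step A Mn Nn r c hr hrM hcmem.1 hcmem.2 s.1 s.2 prev t.1 t.2 hR.1 hR.2)
    (dp, sq) (List.replicate (Nn + 1) (0 : Int), ag) ⟨hinit, h2⟩
  obtain ⟨⟨hL', hrows', hprev', hcur', hzero'⟩, hag'⟩ := hfold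
  exact ⟨⟨hL', hrows', hcur', fun i hi hiM => hzero' i (by omega) hiM⟩, hag'⟩

-- phase 1: after the double loop, B's aggregate dict describes A's squares dict
theorem pvPhase1 (A : List (List Int)) :
    AgRel ((PySem.List.pyRange 0 (A.length : Int) 1).foldl
             (pvRowA A ((A.getD 0 []).length : Int))
             (List.replicate (A.length + 1) (List.replicate ((A.getD 0 []).length + 1) (0 : Int)),
              (PySem.Dict.empty : PySem.Dict Int (Int × List (Int × Int))))).2
          ((PySem.List.pyRange 0 (A.length : Int) 1).foldl
             (pvRowB A ((A.getD 0 []).length : Int))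
             (List.replicate ((A.getD 0 []).length + 1) (0 : Int),
              (PySem.Dict.empty : PySem.Dict Int (Int × Int × Int × Int)))).2 := by
  have hinit1 : OutInv A.length (A.getD 0 []).length (0 : Int).toNat
      (List.replicate (A.length + 1) (List.replicate ((A.getD 0 []).length + 1) (0 : Int)))
      (List.replicate ((A.getD 0 []).length + 1) (0 : Int)) := by
    refine ⟨by simp, ?_, ?_, ?_⟩
    · intro row hrow
      rw [List.eq_of_mem_replicate hrow]
      exact ⟨by simp, fun x hx => by rw [List.eq_of_mem_replicate hx]⟩
    · exact pvGetD_replicate _ _ _ _ (by omega)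
    · intro i _ hiM
      exact pvGetD_replicate _ _ _ _ (by omega)
  have hinit2 : AgRel (PySem.Dict.empty : PySem.Dict Int (Int × List (Int × Int)))
      (PySem.Dict.empty : PySem.Dict Int (Int × Int × Int × Int)) := by
    refine ⟨?_, rfl, ?_⟩
    · exact PySem.Dict.nodup_keys_empty
    · intro e he
      simp [PySem.Dict.empty] at he
  have hfold := pvFoldl_rel_range
    (R := fun (r : Int) (stA : List (List Int) × PySem.Dict Int (Int × List (Int × Int)))
            (stB : List Int × PySem.Dict Int (Int × Int × Int × Int)) =>
        OutInv A.length (A.getD 0 []).length r.toNat stA.1 stB.1 ∧ AgRel stA.2 stB.2)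
    (pvRowA A ((A.getD 0 []).length : Int)) (pvRowB A ((A.getD 0 []).length : Int))
    (A.length : Int) ((A.length : Int) - 0).toNat 0 rfl (by positivity)
    (fun r h1 h2 s t hR => by
      have hrtn : (r + 1).toNat = r.toNat + 1 := by omega
      show OutInv A.length (A.getD 0 []).length (r + 1).toNat _ _ ∧ AgRel _ _
      rw [hrtn]
      exact pvRow_step A A.length (A.getD 0 []).length r h1 h2 s.1 s.2 t.1 t.2 hR.1 hR.2)
    (List.replicate (A.length + 1) (List.replicate ((A.getD 0 []).length + 1) (0 : Int)),
     (PySem.Dict.empty : PySem.Dict Int (Int × List (Int × Int))))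
    (List.replicate ((A.getD 0 []).length + 1) (0 : Int),
     (PySem.Dict.empty : PySem.Dict Int (Int × Int × Int × Int)))
    ⟨hinit1, hinit2⟩
  exact hfold.2

-- ===== VERDICT (by name: the statement is the Claim_ definition above) =====
theorem solution_spec : Claim_equal_solution := by
  unfold Claim_equal_solution
  intro A _ _
  unfold Spec_solution solution solution_alt
  simp only [Int.toNat_natCast]
  exact pvPhase2 _ _ (pvPhase1 A)
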